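-- pv_equiv track=rewrite | github.com/sevenzig/pfr-qb-scraper | tests/test_burrow_splits.py | infer_split_type_from_values
-- ===== SOURCE A (Python) =====
-- def infer_split_type_from_values(values):
--     """Infer split type from values (simplified version)"""
--     if not values:
--         return None
--
--     values_lower = [v.lower() for v in values]
--
--     # Check for common patterns
--     if any('quarter' in v for v in values_lower):
--         return 'quarter'
--     elif any('half' in v for v in values_lower):
--         return 'time'
--     elif any('leading' in v or 'trailing' in v or 'tied' in v for v in values_lower):
--         return 'score_differential'
--     elif any('home' in v or 'away' in v for v in values_lower):
--         return 'place'
--     elif any('win' in v or 'loss' in v for v in values_lower):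
--         return 'result'
--     elif any('down' in v for v in values_lower):
--         return 'down'
--     elif any('yard' in v for v in values_lower):
--         return 'yards_to_go'
--     elif any('zone' in v for v in values_lower):
--         return 'field_position'
--     elif any('huddle' in v or 'shotgun' in v for v in values_lower):
--         return 'snap_type'
--     elif any('action' in v for v in values_lower):
--         return 'play_action'
--     elif any('rpo' in v for v in values_lower):
--         return 'run_pass_option'
--     elif any('second' in v or 'pocket' in v for v in values_lower):
--         return 'time_in_pocket'
--
--     return None
-- ===== SOURCE B (Python) =====
-- # Priority table + single pass keeping the minimal matching pattern index.
-- PATTERNS = [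
--     ('quarter', ['quarter']),
--     ('time', ['half']),
--     ('score_differential', ['leading', 'trailing', 'tied']),
--     ('place', ['home', 'away']),
--     ('result', ['win', 'loss']),
--     ('down', ['down']),
--     ('yards_to_go', ['yard']),
--     ('field_position', ['zone']),
--     ('snap_type', ['huddle', 'shotgun']),
--     ('play_action', ['action']),
--     ('run_pass_option', ['rpo']),
--     ('time_in_pocket', ['second', 'pocket']),
-- ]
--
--
-- def _first_idx(vl):
--     for i, (_label, kws) in enumerate(PATTERNS):
--         if any(kw in vl for kw in kws):
--             return i
--     return len(PATTERNS)
--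
--
-- def infer_split_type_from_values(values):
--     best = len(PATTERNS)
--     for v in values:
--         best = min(best, _first_idx(v.lower()))
--     return PATTERNS[best][0] if best < len(PATTERNS) else None
-- ===== Notes on version B (the rewrite author's own statement) =====
-- stated objective: alternative
-- what changed: Replaced the twelve separate any()-scans over the whole list by a priority table and a single pass over the values that keeps the minimal matching pattern index, then indexes the table once.
import Mathlib
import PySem

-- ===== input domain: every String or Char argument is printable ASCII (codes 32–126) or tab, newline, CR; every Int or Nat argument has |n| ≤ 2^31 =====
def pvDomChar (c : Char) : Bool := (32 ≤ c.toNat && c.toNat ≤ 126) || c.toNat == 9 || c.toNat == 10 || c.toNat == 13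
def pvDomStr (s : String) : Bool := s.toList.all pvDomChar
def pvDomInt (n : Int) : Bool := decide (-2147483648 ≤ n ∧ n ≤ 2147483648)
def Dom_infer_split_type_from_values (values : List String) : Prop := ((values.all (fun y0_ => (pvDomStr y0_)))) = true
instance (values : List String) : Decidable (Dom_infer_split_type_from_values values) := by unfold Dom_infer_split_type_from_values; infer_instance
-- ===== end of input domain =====

-- B replaces A's twelve whole-list any()-scans by a priority table and a single pass
-- keeping the minimal matching pattern index (objective: alternative).

-- ===== PORT A =====
def infer_split_type_from_values (values : List String) : Option String :=
  if values = [] then none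
  else
    let values_lower := values.map PySem.Str.lower
    if values_lower.any (fun v => PySem.Str.isIn "quarter" v) then some "quarter"
    else if values_lower.any (fun v => PySem.Str.isIn "half" v) then some "time"
    else if values_lower.any (fun v => PySem.Str.isIn "leading" v || PySem.Str.isIn "trailing" v || PySem.Str.isIn "tied" v) then some "score_differential"
    else if values_lower.any (fun v => PySem.Str.isIn "home" v || PySem.Str.isIn "away" v) then some "place"
    else if values_lower.any (fun v => PySem.Str.isIn "win" v || PySem.Str.isIn "loss" v) then some "result"
    else if values_lower.any (fun v => PySem.Str.isIn "down" v) then some "down"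
    else if values_lower.any (fun v => PySem.Str.isIn "yard" v) then some "yards_to_go"
    else if values_lower.any (fun v => PySem.Str.isIn "zone" v) then some "field_position"
    else if values_lower.any (fun v => PySem.Str.isIn "huddle" v || PySem.Str.isIn "shotgun" v) then some "snap_type"
    else if values_lower.any (fun v => PySem.Str.isIn "action" v) then some "play_action"
    else if values_lower.any (fun v => PySem.Str.isIn "rpo" v) then some "run_pass_option"
    else if values_lower.any (fun v => PySem.Str.isIn "second" v || PySem.Str.isIn "pocket" v) then some "time_in_pocket"
    else none

-- ===== PORT B =====
def pvPatterns : List (String × List String) :=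
  [("quarter", ["quarter"]),
   ("time", ["half"]),
   ("score_differential", ["leading", "trailing", "tied"]),
   ("place", ["home", "away"]),
   ("result", ["win", "loss"]),
   ("down", ["down"]),
   ("yards_to_go", ["yard"]),
   ("field_position", ["zone"]),
   ("snap_type", ["huddle", "shotgun"]),
   ("play_action", ["action"]),
   ("run_pass_option", ["rpo"]),
   ("time_in_pocket", ["second", "pocket"])]

-- Source B's _first_idx: index of the first pattern whose keyword set matches, else len(PATTERNS)
def pvFirstIdx (vl : String) : Nat :=
  pvPatterns.findIdx (fun p => p.2.any (fun kw => PySem.Str.isIn kw vl))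

def infer_split_type_from_values_alt (values : List String) : Option String :=
  let best := values.foldl (fun b v => min b (pvFirstIdx (PySem.Str.lower v))) pvPatterns.length
  (pvPatterns[best]?).map (fun p => p.1)

-- ===== PRECONDITION & SPEC =====
def Spec_infer_split_type_from_values (values : List String) (out : Option String) : Prop := out = infer_split_type_from_values_alt values
instance (values : List String) (out : Option String) : Decidable (Spec_infer_split_type_from_values values out) := by unfold Spec_infer_split_type_from_values; infer_instance

-- ===== CLAIM (what is proved, stated in full; the proofs are below) =====
def Claim_equal_infer_split_type_from_values : Prop := ∀ (values : List String), Dom_infer_split_type_from_values values → Spec_infer_split_type_from_values values (infer_split_type_from_values values)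

-- ===== LEMMAS AND PROOFS =====

-- predicate of pattern j on (uncapitalised) value v, used to restate A's conditions
def pvPred (j : Nat) (v : String) : Bool :=
  ((pvPatterns[j]?.getD ("", [])).2).any (fun kw => PySem.Str.isIn kw (PySem.Str.lower v))

theorem pvPred_true_of_eq (v : String) (j : Nat) (hj : j < 12)
    (h : pvFirstIdx (PySem.Str.lower v) = j) : pvPred j v = true := by
  unfold pvFirstIdx at h
  have hlt : pvPatterns.findIdx (fun p => p.2.any (fun kw => PySem.Str.isIn kw (PySem.Str.lower v))) < pvPatterns.length := by
    rw [h]; simp [pvPatterns]; omega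
  have hget := List.findIdx_getElem (w := hlt)
  simp only [h] at hget
  unfold pvPred
  rw [List.getElem?_eq_getElem (by simp [pvPatterns]; omega)]
  simpa using hget

theorem pvFirstIdx_le_of_pred (v : String) (j : Nat) (hj : j < 12)
    (h : pvPred j v = true) : pvFirstIdx (PySem.Str.lower v) ≤ j := by
  by_contra hc
  push Not at hc
  have hf : (fun (p : String × List String) => p.2.any (fun kw => PySem.Str.isIn kw (PySem.Str.lower v))) (pvPatterns[j]'(by simp [pvPatterns]; omega)) = false :=
    List.not_of_lt_findIdx hc
  unfold pvPred at h
  rw [List.getElem?_eq_getElem (by simp [pvPatterns]; omega)] at h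
  simp only [Option.getD_some, List.any_eq_true] at h
  obtain ⟨x, hx, hxt⟩ := h
  have := List.any_eq_false.mp (by simpa using hf) x hx
  simp_all

theorem pvCondTrue (values : List String) (j : Nat) (hj : j < 12)
    (hex : ∃ v ∈ values, pvFirstIdx (PySem.Str.lower v) = j) :
    values.any (pvPred j) = true := by
  obtain ⟨v, hv, he⟩ := hex
  exact List.any_eq_true.mpr ⟨v, hv, pvPred_true_of_eq v j hj he⟩

theorem pvCondFalse (values : List String) (j : Nat) (hj : j < 12)
    (hall : ∀ v ∈ values, j < pvFirstIdx (PySem.Str.lower v)) :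
    values.any (pvPred j) = false := by
  rw [List.any_eq_false]
  intro v hv hc
  have h1 := pvFirstIdx_le_of_pred v j hj hc
  have h2 := hall v hv
  omega

-- foldl-min facts
theorem foldl_min_le (l : List String) (a : Nat) :
    (∀ v ∈ l, l.foldl (fun b v => min b (pvFirstIdx (PySem.Str.lower v))) a ≤ pvFirstIdx (PySem.Str.lower v)) ∧
    l.foldl (fun b v => min b (pvFirstIdx (PySem.Str.lower v))) a ≤ a := by
  induction l generalizing a with
  | nil => simp
  | cons x xs ih =>
    refine ⟨?_, ?_⟩
    · intro v hv
      rw [List.mem_cons] at hv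
      rcases hv with h | h
      · subst h; exact le_trans (ih (min a (pvFirstIdx (PySem.Str.lower v)))).2 (by simp)
      · exact (ih (min a (pvFirstIdx (PySem.Str.lower x)))).1 v h
    · exact le_trans (ih (min a (pvFirstIdx (PySem.Str.lower x)))).2 (by simp)

theorem foldl_min_attained (l : List String) (a : Nat) :
    l.foldl (fun b v => min b (pvFirstIdx (PySem.Str.lower v))) a = a ∨
    ∃ v ∈ l, l.foldl (fun b v => min b (pvFirstIdx (PySem.Str.lower v))) a = pvFirstIdx (PySem.Str.lower v) := by
  induction l generalizing a with
  | nil => simp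
  | cons x xs ih =>
    rcases ih (min a (pvFirstIdx (PySem.Str.lower x))) with h | ⟨v, hv, he⟩
    · by_cases hle : a ≤ pvFirstIdx (PySem.Str.lower x)
      · left; simpa [min_eq_left hle] using h
      · right; exact ⟨x, by simp, by simp only [List.foldl_cons]; rw [h]; exact min_eq_right (by omega)⟩
    · right; exact ⟨v, by simp [hv], he⟩

theorem A_eq_chain (values : List String) :
    infer_split_type_from_values values =
  if values = [] then none
  else if values.any (pvPred 0) then some "quarter"
  else if values.any (pvPred 1) then some "time"
  else if values.any (pvPred 2) then some "score_differential"
  else if values.any (pvPred 3) then some "place"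
  else if values.any (pvPred 4) then some "result"
  else if values.any (pvPred 5) then some "down"
  else if values.any (pvPred 6) then some "yards_to_go"
  else if values.any (pvPred 7) then some "field_position"
  else if values.any (pvPred 8) then some "snap_type"
  else if values.any (pvPred 9) then some "play_action"
  else if values.any (pvPred 10) then some "run_pass_option"
  else if values.any (pvPred 11) then some "time_in_pocket"
  else none := by
  unfold infer_split_type_from_values
  simp [pvPred, pvPatterns, List.any_map, Function.comp_def, or_assoc]

theorem main_eq (values : List String) :
    infer_split_type_from_values values = infer_split_type_from_values_alt values := by
  rw [A_eq_chain]
  unfold infer_split_type_from_values_alt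
  dsimp only
  simp only [show pvPatterns.length = 12 from rfl]
  set m := values.foldl (fun b v => min b (pvFirstIdx (PySem.Str.lower v))) 12 with hm
  have hb := foldl_min_le values 12
  have hatt := foldl_min_attained values 12
  rw [← hm] at hb hatt
  have hle12 : m ≤ 12 := hb.2
  have hlow : ∀ v ∈ values, m ≤ pvFirstIdx (PySem.Str.lower v) := hb.1
  have hex : m < 12 → ∃ v ∈ values, pvFirstIdx (PySem.Str.lower v) = m := by
    intro h
    rcases hatt with h12 | ⟨v, hv, he⟩
    · omega
    · exact ⟨v, hv, he.symm⟩
  have hT : m < 12 → values.any (pvPred m) = true := fun h => pvCondTrue values m h (hex h)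
  have hne : m < 12 → values ≠ [] := by
    intro h hempty
    obtain ⟨v, hv, _⟩ := hex h
    simp [hempty] at hv
  have hF : ∀ i < m, values.any (pvPred i) = false := fun i hi =>
    pvCondFalse values i (by omega) (fun v hv => lt_of_lt_of_le hi (hlow v hv))
  clear hb hatt hex hm
  interval_cases m
  · simp [ hT (by omega), hne (by omega), pvPatterns]
  · simp [hF 0 (by omega), hT (by omega), hne (by omega), pvPatterns]
  · simp [hF 0 (by omega), hF 1 (by omega), hT (by omega), hne (by omega), pvPatterns]
  · simp [hF 0 (by omega), hF 1 (by omega), hF 2 (by omega), hT (by omega), hne (by omega), pvPatterns]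
  · simp [hF 0 (by omega), hF 1 (by omega), hF 2 (by omega), hF 3 (by omega), hT (by omega), hne (by omega), pvPatterns]
  · simp [hF 0 (by omega), hF 1 (by omega), hF 2 (by omega), hF 3 (by omega), hF 4 (by omega), hT (by omega), hne (by omega), pvPatterns]
  · simp [hF 0 (by omega), hF 1 (by omega), hF 2 (by omega), hF 3 (by omega), hF 4 (by omega), hF 5 (by omega), hT (by omega), hne (by omega), pvPatterns]
  · simp [hF 0 (by omega), hF 1 (by omega), hF 2 (by omega), hF 3 (by omega), hF 4 (by omega), hF 5 (by omega), hF 6 (by omega), hT (by omega), hne (by omega), pvPatterns]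
  · simp [hF 0 (by omega), hF 1 (by omega), hF 2 (by omega), hF 3 (by omega), hF 4 (by omega), hF 5 (by omega), hF 6 (by omega), hF 7 (by omega), hT (by omega), hne (by omega), pvPatterns]
  · simp [hF 0 (by omega), hF 1 (by omega), hF 2 (by omega), hF 3 (by omega), hF 4 (by omega), hF 5 (by omega), hF 6 (by omega), hF 7 (by omega), hF 8 (by omega), hT (by omega), hne (by omega), pvPatterns]
  · simp [hF 0 (by omega), hF 1 (by omega), hF 2 (by omega), hF 3 (by omega), hF 4 (by omega), hF 5 (by omega), hF 6 (by omega), hF 7 (by omega), hF 8 (by omega), hF 9 (by omega), hT (by omega), hne (by omega), pvPatterns]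
  · simp [hF 0 (by omega), hF 1 (by omega), hF 2 (by omega), hF 3 (by omega), hF 4 (by omega), hF 5 (by omega), hF 6 (by omega), hF 7 (by omega), hF 8 (by omega), hF 9 (by omega), hF 10 (by omega), hT (by omega), hne (by omega), pvPatterns]
  · by_cases he : values = [] <;> simp [he, hF 0 (by omega), hF 1 (by omega), hF 2 (by omega), hF 3 (by omega), hF 4 (by omega), hF 5 (by omega), hF 6 (by omega), hF 7 (by omega), hF 8 (by omega), hF 9 (by omega), hF 10 (by omega), hF 11 (by omega), pvPatterns]


-- ===== VERDICT (by name: the statement is the Claim_ definition above) =====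
theorem infer_split_type_from_values_spec : Claim_equal_infer_split_type_from_values := by
  intro values _
  exact main_eq values
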